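-- pv_equiv track=rewrite | github.com/pypi-data/pypi-mirror-287 | packages/freyja-plot/freyja_plot-0.8.2.tar.gz/freyja_plot-0.8.2/freyja_plot/freyja_plot.py | _updateSummaryDict
-- ===== SOURCE A (Python) =====
-- def _updateSummaryDict(main_dict:dict,adjustments:dict):
--     """Updates `main_dict` using `adjustments`.
--
--     If a lineage <key> ends with '.*', it and its sublineages will all recieve the <value>
--     """
--
--     if not adjustments:
--         return main_dict
--
--     main_dict.update({k:v for k,v in adjustments.items() if not k.endswith(".*")})
--     main_dict.update({k.rstrip('.*'):v for k,v in adjustments.items() if k.endswith(".*")})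
--     # # old, simple way
--     # return main_dict
--     for k in main_dict.keys():
--         for update_key, update_value in adjustments.items():
--             if update_key.endswith(".*"):
--                 base = update_key.replace(".*","")
--                 if k == base or k.startswith(f"{base}."):
--                     main_dict[k] = update_value
--             else:
--                 if k == update_key:
--                     main_dict[k] = update_value
--     # temp check:
--
--     return main_dict
-- ===== SOURCE B (Python) =====
-- def _better(best, cand):
--     """Return the later-positioned of two optional (position, value) candidates."""
--     if cand is None:
--         return best
--     if best is None or best[0] < cand[0]:
--         return cand
--     return best
--
-- def _updateSummaryDict(main_dict: dict, adjustments: dict):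
--     """Same result as the original, but instead of testing every adjustment
--     against every key, indexes the adjustments once (exact keys and wildcard
--     bases, with their positions) and resolves each key by probing its dotted
--     prefixes; the latest-positioned matching adjustment wins, as in the
--     original's overwrite loop.  Mutates main_dict in place, like the original."""
--     if not adjustments:
--         return main_dict
--     main_dict.update({k: v for k, v in adjustments.items() if not k.endswith(".*")})
--     main_dict.update({k.rstrip('.*'): v for k, v in adjustments.items() if k.endswith(".*")})
--     items = list(adjustments.items())
--     exact = {k: (i, v) for i, (k, v) in enumerate(items) if not k.endswith(".*")}
--     wild = {k.replace(".*", ""): (i, v) for i, (k, v) in enumerate(items) if k.endswith(".*")}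
--     for k in main_dict:
--         best = exact.get(k)
--         for j, ch in enumerate(k):
--             if ch == '.':
--                 best = _better(best, wild.get(k[:j]))
--         best = _better(best, wild.get(k))
--         if best is not None:
--             main_dict[k] = best[1]
--     return main_dict
-- ===== Notes on version B (the rewrite author's own statement) =====
-- stated objective: faster
-- what changed: Instead of testing every adjustment against every key (nested loops), B builds two hash tables once (exact adjustment keys, and wildcard bases, each with their position) and resolves each key by probing the table at the key itself and at each of its dotted prefixes, taking the latest-positioned match.
import Mathlib
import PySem

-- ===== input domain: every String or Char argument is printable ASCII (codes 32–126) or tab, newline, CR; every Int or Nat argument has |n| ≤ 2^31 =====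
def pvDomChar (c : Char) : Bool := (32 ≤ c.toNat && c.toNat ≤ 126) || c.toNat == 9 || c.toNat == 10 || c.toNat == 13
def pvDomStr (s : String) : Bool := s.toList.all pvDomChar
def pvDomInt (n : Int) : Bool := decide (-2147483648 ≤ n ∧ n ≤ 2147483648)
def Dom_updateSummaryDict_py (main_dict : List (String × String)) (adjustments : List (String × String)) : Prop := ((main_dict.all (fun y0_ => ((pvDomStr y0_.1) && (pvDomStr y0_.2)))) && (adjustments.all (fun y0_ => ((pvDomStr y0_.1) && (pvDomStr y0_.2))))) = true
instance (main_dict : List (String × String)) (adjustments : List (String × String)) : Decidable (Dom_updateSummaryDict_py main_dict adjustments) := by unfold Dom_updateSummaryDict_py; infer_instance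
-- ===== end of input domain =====

-- B replaces A's scan of every adjustment for every key by an index of the adjustments
-- (exact keys / wildcard bases with positions) probed at each key's dotted prefixes;
-- both mutate main_dict the same way, the theorems are about the returned dict's items.

-- exact hand port of s.rstrip('.*'): drop trailing '.' / '*' characters (both Pythons use it)
def pyRstripDotStar (s : String) : String :=
  String.ofList ((s.toList.reverse.dropWhile (fun c => c == '.' || c == '*')).reverse)

-- ===== PORT A =====
def updateSummaryDict_py (main_dict : List (String × String)) (adjustments : List (String × String)) : List (String × String) :=
  let md := PySem.Dict.ofList main_dict
  let adj := PySem.Dict.ofList adjustments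
  if adj.items = [] then md.items
  else
    let md := md.update (adj.items.filter (fun p => !(PySem.Str.endswith p.1 ".*")))
    let md := md.update ((adj.items.filter (fun p => PySem.Str.endswith p.1 ".*")).map (fun p => (pyRstripDotStar p.1, p.2)))
    let md := md.keys.foldl (fun d k =>
        adj.items.foldl (fun d p =>
          if PySem.Str.endswith p.1 ".*" then
            let base := PySem.Str.replace p.1 ".*" ""
            if k == base || PySem.Str.startswith k (base ++ ".") then d.insert k p.2 else d
          else
            if k == p.1 then d.insert k p.2 else d) d) md
    md.items

-- ===== PORT B =====
-- port of Source B's _better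
def pvBetter (best : Option (Int × String)) (cand : Option (Int × String)) : Option (Int × String) :=
  match cand with
  | none => best
  | some c =>
    match best with
    | none => some c
    | some b => if b.1 < c.1 then some c else some b

def updateSummaryDict_py_alt (main_dict : List (String × String)) (adjustments : List (String × String)) : List (String × String) :=
  let md := PySem.Dict.ofList main_dict
  let adj := PySem.Dict.ofList adjustments
  if adj.items = [] then md.items
  else
    let md := md.update (adj.items.filter (fun p => !(PySem.Str.endswith p.1 ".*")))
    let md := md.update ((adj.items.filter (fun p => PySem.Str.endswith p.1 ".*")).map (fun p => (pyRstripDotStar p.1, p.2)))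
    let items := adj.items
    let exact := PySem.Dict.ofList (((PySem.List.enumerate items).filter (fun q => !(PySem.Str.endswith q.2.1 ".*"))).map (fun q => (q.2.1, (q.1, q.2.2))))
    let wild := PySem.Dict.ofList (((PySem.List.enumerate items).filter (fun q => PySem.Str.endswith q.2.1 ".*")).map (fun q => (PySem.Str.replace q.2.1 ".*" "", (q.1, q.2.2))))
    let md := md.keys.foldl (fun d k =>
        let best := exact.get? k
        let best := (PySem.List.enumerate k.toList).foldl (fun best q =>
            -- k[:j] with j = q.1 ≥ 0: exact as take
            if q.2 == '.' then pvBetter best (wild.get? (String.ofList (k.toList.take q.1.toNat))) else best) best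
        let best := pvBetter best (wild.get? k)
        match best with
        | some b => d.insert k b.2
        | none => d) md
    md.items

-- ===== PRECONDITION & SPEC =====
def Spec_updateSummaryDict_py (main_dict : List (String × String)) (adjustments : List (String × String)) (out : List (String × String)) : Prop := out = updateSummaryDict_py_alt main_dict adjustments
instance (main_dict : List (String × String)) (adjustments : List (String × String)) (out : List (String × String)) : Decidable (Spec_updateSummaryDict_py main_dict adjustments out) := by unfold Spec_updateSummaryDict_py; infer_instance

-- ===== CLAIM (what is proved, stated in full; the proofs are below) =====
def Claim_equal_updateSummaryDict_py : Prop := ∀ (main_dict : List (String × String)) (adjustments : List (String × String)), Dom_updateSummaryDict_py main_dict adjustments → Spec_updateSummaryDict_py main_dict adjustments (updateSummaryDict_py main_dict adjustments)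

-- ===== LEMMAS AND PROOFS =====

-- whether adjustment item p applies to key k (the tests A's inner loop performs)
def matchesP (k : String) (p : String × String) : Bool :=
  if PySem.Str.endswith p.1 ".*" then
    (k == PySem.Str.replace p.1 ".*" "" || PySem.Str.startswith k (PySem.Str.replace p.1 ".*" "" ++ "."))
  else k == p.1

-- A's loop body, written with matchesP
theorem stepA_eq (k : String) (d : PySem.Dict String String) (p : String × String) :
    (if PySem.Str.endswith p.1 ".*" then
        let base := PySem.Str.replace p.1 ".*" ""
        if k == base || PySem.Str.startswith k (base ++ ".") then d.insert k p.2 else d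
      else
        if k == p.1 then d.insert k p.2 else d)
    = if matchesP k p then d.insert k p.2 else d := by
  unfold matchesP
  by_cases h : PySem.Str.endswith p.1 ".*"
  · simp only [h, if_true]
  · have h' : PySem.Str.endswith p.1 ".*" = false := by simpa using h
    simp only [h', Bool.false_eq_true, if_false]

-- A's inner loop applies the LAST matching adjustment
theorem foldA_eq (k : String) (l : List (String × String)) (d : PySem.Dict String String) :
    l.foldl (fun d p =>
          if PySem.Str.endswith p.1 ".*" then
            let base := PySem.Str.replace p.1 ".*" ""
            if k == base || PySem.Str.startswith k (base ++ ".") then d.insert k p.2 else d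
          else
            if k == p.1 then d.insert k p.2 else d) d
      = ((l.filter (matchesP k)).getLast?).elim d (fun p => d.insert k p.2) := by
  have hf : (fun (d : PySem.Dict String String) (p : String × String) =>
      if PySem.Str.endswith p.1 ".*" then
        let base := PySem.Str.replace p.1 ".*" ""
        if k == base || PySem.Str.startswith k (base ++ ".") then d.insert k p.2 else d
      else
        if k == p.1 then d.insert k p.2 else d)
      = fun d p => if matchesP k p then d.insert k p.2 else d :=
    funext fun d => funext fun p => stepA_eq k d p
  rw [hf]
  induction l generalizing d with
  | nil => rfl
  | cons p l ih =>
    simp only [List.foldl_cons, List.filter_cons]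
    by_cases hm : matchesP k p
    · simp only [hm, if_pos]
      rw [ih]
      cases hfl : (l.filter (matchesP k)) with
      | nil => simp [hfl]
      | cons q t =>
        rw [List.getLast?_cons_cons]
        cases hgl : (q :: t).getLast? with
        | none => simp at hgl
        | some m => simp [PySem.Dict.insert_insert_self]
    · simp only [hm, if_neg, Bool.false_eq_true, not_false_iff, if_false]
      exact ih d

-- lookup after a run of inserts = last binding of that key, else the old value
theorem get?_foldl_insert {ν : Type} (q : String) :
    ∀ (l : List (String × ν)) (d : PySem.Dict String ν),
    (l.foldl (fun d p => d.insert p.1 p.2) d).get? q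
      = ((l.filter (fun p => p.1 == q)).getLast?).elim (d.get? q) (fun p => some p.2) := by
  intro l
  induction l with
  | nil => intro d; rfl
  | cons p l ih =>
    intro d
    simp only [List.foldl_cons, List.filter_cons]
    by_cases hp : p.1 = q
    · simp only [hp, beq_self_eq_true, if_pos]
      rw [ih]
      cases hfl : (l.filter (fun p => p.1 == q)) with
      | nil => simp [hfl, PySem.Dict.get?_insert, hp]
      | cons r t =>
        rw [List.getLast?_cons_cons]
        cases hgl : (r :: t).getLast? with
        | none => simp at hgl
        | some m => simp
    · have hb : (p.1 == q) = false := by simpa using hp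
      simp only [hb, Bool.false_eq_true, if_false]
      rw [ih]
      have : (d.insert p.1 p.2).get? q = d.get? q := by
        rw [PySem.Dict.get?_insert, if_neg (fun h => hp h.symm)]
      rw [this]

theorem get?_update_eq {ν : Type} (l : List (String × ν)) (d : PySem.Dict String ν) (q : String) :
    (d.update l).get? q
      = ((l.filter (fun p => p.1 == q)).getLast?).elim (d.get? q) (fun p => some p.2) :=
  get?_foldl_insert q l d

theorem get?_ofList_eq {ν : Type} (l : List (String × ν)) (q : String) :
    (PySem.Dict.ofList l).get? q
      = ((l.filter (fun p => p.1 == q)).getLast?).map (fun p => p.2) := by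
  have := get?_update_eq l (PySem.Dict.empty) q
  rw [show (PySem.Dict.ofList l) = PySem.Dict.empty.update l from rfl, this]
  cases (l.filter (fun p => p.1 == q)).getLast? <;> simp [PySem.Dict.get?_empty]

-- in a Pairwise-R list, every member is the last element or R-below it
theorem pairwise_getLast {α : Type} {R : α → α → Prop} :
    ∀ (xs : List α), xs.Pairwise R → ∀ q ∈ xs, ∃ m, xs.getLast? = some m ∧ (q = m ∨ R q m) := by
  intro xs
  induction xs with
  | nil => intro _ q hq; simp at hq
  | cons x xs ih =>
    intro hp q hq
    cases xs with
    | nil =>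
      simp at hq
      exact ⟨x, rfl, Or.inl hq⟩
    | cons y ys =>
      rw [List.getLast?_cons_cons]
      rcases List.mem_cons.mp hq with hqx | hqm
      · obtain ⟨m, hm, _⟩ := ih hp.of_cons y (List.mem_cons_self)
        exact ⟨m, hm, Or.inr (hqx ▸ List.rel_of_pairwise_cons hp (List.mem_of_getLast? hm))⟩
      · exact ih hp.of_cons q hqm

-- the character scan is a pvBetter-fold over the options at the dots
theorem scan_eq (g : Int × Char → Option (Int × String)) :
    ∀ (l : List (Int × Char)) (b : Option (Int × String)),
    l.foldl (fun best q => if q.2 == '.' then pvBetter best (g q) else best) b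
      = ((l.filter (fun q => q.2 == '.')).map g).foldl pvBetter b := by
  intro l
  induction l with
  | nil => intro b; rfl
  | cons p l ih =>
    intro b
    simp only [List.foldl_cons, List.filter_cons]
    by_cases hp : (p.2 == '.') = true
    · rw [hp]
      simp only [if_true, List.map_cons, List.foldl_cons]
      exact ih _
    · have hb : (p.2 == '.') = false := by simpa using hp
      rw [hb]
      simp only [Bool.false_eq_true, if_false]
      exact ih b

-- a pvBetter-fold whose candidates all lie in S and which sees the maximum m returns m
theorem betterFold_max (S : List (Int × String)) (m : Int × String)
    (hS : ∀ x ∈ S, x = m ∨ x.1 < m.1) :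
    ∀ (opts : List (Option (Int × String))) (b : Option (Int × String)),
    (∀ o ∈ opts, ∀ x, o = some x → x ∈ S) →
    (∀ x, b = some x → x ∈ S) →
    ((some m ∈ opts) ∨ b = some m) →
    opts.foldl pvBetter b = some m := by
  intro opts
  induction opts with
  | nil =>
    intro b _ _ h2
    rcases h2 with h | h
    · simp at h
    · simpa using h
  | cons o opts ih =>
    intro b h1 hb h2
    simp only [List.foldl_cons]
    apply ih
    · intro o' ho' x hx; exact h1 o' (List.mem_cons_of_mem _ ho') x hx
    · intro x hx
      unfold pvBetter at hx
      cases ho : o with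
      | none => rw [ho] at hx; simp [ho] at hx; exact hb x (by rw [hx])
      | some c =>
        rw [ho] at hx
        cases hbv : b with
        | none => simp [hbv] at hx; exact h1 o (List.mem_cons_self) x (by rw [ho, hx])
        | some bx =>
          simp only [hbv] at hx
          by_cases hlt : bx.1 < c.1
          · simp [hlt] at hx; exact h1 o (List.mem_cons_self) x (by rw [ho, hx])
          · simp [hlt] at hx; exact hb x (by rw [hbv, hx])
    · rcases h2 with h | h
      · rcases List.mem_cons.mp h with h | h
        · -- o = some m
          right
          unfold pvBetter
          rw [← h]
          cases hbv : b with
          | none => rfl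
          | some bx =>
            rcases hS bx (hb bx hbv) with hbm | hblt
            · by_cases hlt : bx.1 < m.1 <;> simp [hlt, hbm]
            · simp [hblt]
        · exact Or.inl h
      · -- b = some m
        right
        unfold pvBetter
        cases ho : o with
        | none => exact h
        | some c =>
          rw [h]
          rcases hS c (h1 o (List.mem_cons_self) c ho) with hcm | hclt
          · by_cases hlt : m.1 < c.1 <;> simp [hlt, hcm]
          · have : ¬ m.1 < c.1 := by omega
            simp [this]

theorem betterFold_none :
    ∀ (opts : List (Option (Int × String))) , (∀ o ∈ opts, o = none) →
    opts.foldl pvBetter none = none := by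
  intro opts
  induction opts with
  | nil => intro _; rfl
  | cons o opts ih =>
    intro h
    simp only [List.foldl_cons]
    rw [h o List.mem_cons_self]
    exact ih (fun o' ho' => h o' (List.mem_cons_of_mem _ ho'))

theorem filter_enum_snd {α : Type} (P : α → Bool) :
    ∀ (l : List α) (s : Int),
    (((PySem.List.enumerate l s).filter (fun q => P q.2)).map (fun q => q.2)) = l.filter P := by
  intro l
  induction l with
  | nil => intro s; rfl
  | cons x l ih =>
    intro s
    rw [PySem.List.enumerate_cons]
    by_cases hx : P x
    · simp [List.filter_cons, hx, ih]
    · simp [List.filter_cons, hx, ih]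

-- proof-side names for B's two index tables
def wildD (items : List (String × String)) : PySem.Dict String (Int × String) :=
  PySem.Dict.ofList (((PySem.List.enumerate items).filter (fun q => PySem.Str.endswith q.2.1 ".*")).map (fun q => (PySem.Str.replace q.2.1 ".*" "", (q.1, q.2.2))))

def exactD (items : List (String × String)) : PySem.Dict String (Int × String) :=
  PySem.Dict.ofList (((PySem.List.enumerate items).filter (fun q => !(PySem.Str.endswith q.2.1 ".*"))).map (fun q => (q.2.1, (q.1, q.2.2))))

theorem wildD_get?_eq (items : List (String × String)) (b : String) :
    (wildD items).get? b
      = (((PySem.List.enumerate items).filter (fun q => (PySem.Str.replace q.2.1 ".*" "" == b) && PySem.Str.endswith q.2.1 ".*")).getLast?).map (fun q => (q.1, q.2.2)) := by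
  unfold wildD
  rw [get?_ofList_eq, List.filter_map, List.filter_filter, List.getLast?_map, Option.map_map]
  rfl

theorem exactD_get?_eq (items : List (String × String)) (k : String) :
    (exactD items).get? k
      = (((PySem.List.enumerate items).filter (fun q => (q.2.1 == k) && !(PySem.Str.endswith q.2.1 ".*"))).getLast?).map (fun q => (q.1, q.2.2)) := by
  unfold exactD
  rw [get?_ofList_eq, List.filter_map, List.filter_filter, List.getLast?_map, Option.map_map]
  rfl

-- if the last P-filtered item exists, it is a matching item
theorem lastP_mem (items : List (String × String)) (k : String)
    (P : Int × String × String → Bool) (himp : ∀ q, P q = true → matchesP k q.2 = true)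
    (q : Int × String × String)
    (h : ((PySem.List.enumerate items).filter P).getLast? = some q) :
    q ∈ (PySem.List.enumerate items).filter (fun q => matchesP k q.2) := by
  have hm := List.mem_of_getLast? h
  exact List.mem_filter.mpr ⟨(List.mem_filter.mp hm).1, himp q (List.mem_filter.mp hm).2⟩

-- the overall last matching item, if it satisfies P, is also the last P-filtered item
theorem lastP_hit (items : List (String × String)) (k : String)
    (P : Int × String × String → Bool) (himp : ∀ q, P q = true → matchesP k q.2 = true)
    (qs : Int × String × String)
    (hgl : ((PySem.List.enumerate items).filter (fun q => matchesP k q.2)).getLast? = some qs)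
    (hP : P qs = true) :
    ((PySem.List.enumerate items).filter P).getLast? = some qs := by
  have hqsE := List.mem_of_getLast? hgl
  have hqsP : qs ∈ (PySem.List.enumerate items).filter P :=
    List.mem_filter.mpr ⟨(List.mem_filter.mp hqsE).1, hP⟩
  have hpw : ((PySem.List.enumerate items).filter P).Pairwise (fun p q => p.1 < q.1) :=
    List.Pairwise.filter P (PySem.List.pairwise_lt_enumerate items 0)
  obtain ⟨m, hm, hrel⟩ := pairwise_getLast _ hpw qs hqsP
  rcases hrel with heq | hlt
  · rw [hm, heq]
  · exfalso
    have hmE := lastP_mem items k P himp m hm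
    have hpwE : ((PySem.List.enumerate items).filter (fun q => matchesP k q.2)).Pairwise (fun p q => p.1 < q.1) :=
      List.Pairwise.filter _ (PySem.List.pairwise_lt_enumerate items 0)
    obtain ⟨m', hm', hrel'⟩ := pairwise_getLast _ hpwE m hmE
    rw [hgl] at hm'
    injection hm' with hm'
    subst hm'
    rcases hrel' with heq' | hlt'
    · subst heq'; omega
    · omega

-- per-key equality of the two loop bodies
theorem key_step_eq (items : List (String × String)) (k : String) (d : PySem.Dict String String) :
    (match pvBetter
        ((PySem.List.enumerate k.toList).foldl
          (fun best q => if q.2 == '.' then pvBetter best ((wildD items).get? (String.ofList (k.toList.take q.1.toNat))) else best)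
          ((exactD items).get? k))
        ((wildD items).get? k) with
     | some b => d.insert k b.2
     | none => d)
    = ((items.filter (matchesP k)).getLast?).elim d (fun p => d.insert k p.2) := by
  rw [scan_eq]
  rw [show ∀ (b0 : Option (Int × String)),
      pvBetter ((((PySem.List.enumerate k.toList).filter (fun q => q.2 == '.')).map
          (fun q => (wildD items).get? (String.ofList (k.toList.take q.1.toNat)))).foldl pvBetter b0)
        ((wildD items).get? k)
      = ((((PySem.List.enumerate k.toList).filter (fun q => q.2 == '.')).map
          (fun q => (wildD items).get? (String.ofList (k.toList.take q.1.toNat)))) ++ [(wildD items).get? k]).foldl pvBetter b0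
    from fun b0 => by rw [List.foldl_append]; rfl]
  rw [show items.filter (matchesP k)
        = ((PySem.List.enumerate items).filter (fun q => matchesP k q.2)).map (fun q => q.2)
      from (filter_enum_snd (matchesP k) items 0).symm]
  rw [List.getLast?_map]
  -- candidate soundness: any hit of the wild table at a base matching k is a matching item
  have hcand : ∀ (b : String), (k == b || PySem.Str.startswith k (b ++ ".")) = true →
      ∀ x, (wildD items).get? b = some x →
      x ∈ ((PySem.List.enumerate items).filter (fun q => matchesP k q.2)).map (fun q => (q.1, q.2.2)) := by
    intro b hb x hx
    rw [wildD_get?_eq] at hx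
    cases hgl : ((PySem.List.enumerate items).filter (fun q => (PySem.Str.replace q.2.1 ".*" "" == b) && PySem.Str.endswith q.2.1 ".*")).getLast? with
    | none => rw [hgl] at hx; simp at hx
    | some q =>
      rw [hgl] at hx
      simp only [Option.map_some] at hx
      have himp : ∀ q : Int × String × String, ((PySem.Str.replace q.2.1 ".*" "" == b) && PySem.Str.endswith q.2.1 ".*") = true → matchesP k q.2 = true := by
        intro q hq
        simp only [Bool.and_eq_true] at hq
        obtain ⟨hrep, hew⟩ := hq
        have hrep' : PySem.Str.replace q.2.1 ".*" "" = b := by simpa using hrep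
        unfold matchesP
        rw [if_pos hew, hrep']
        exact hb
      have := lastP_mem items k _ himp q hgl
      exact List.mem_map.mpr ⟨q, this, Option.some.inj hx⟩
  have hexcand : ∀ x, (exactD items).get? k = some x →
      x ∈ ((PySem.List.enumerate items).filter (fun q => matchesP k q.2)).map (fun q => (q.1, q.2.2)) := by
    intro x hx
    rw [exactD_get?_eq] at hx
    cases hgl : ((PySem.List.enumerate items).filter (fun q => (q.2.1 == k) && !(PySem.Str.endswith q.2.1 ".*"))).getLast? with
    | none => rw [hgl] at hx; simp at hx
    | some q =>
      rw [hgl] at hx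
      simp only [Option.map_some] at hx
      have himp : ∀ q : Int × String × String, ((q.2.1 == k) && !(PySem.Str.endswith q.2.1 ".*")) = true → matchesP k q.2 = true := by
        intro q hq
        simp only [Bool.and_eq_true] at hq
        obtain ⟨hkey, hew⟩ := hq
        have hew' : PySem.Str.endswith q.2.1 ".*" = false := by simpa using hew
        unfold matchesP
        rw [hew']
        simp only [Bool.false_eq_true, if_false]
        have : q.2.1 = k := by simpa using hkey
        simp [this]
      have := lastP_mem items k _ himp q hgl
      exact List.mem_map.mpr ⟨q, this, Option.some.inj hx⟩
  -- every scanned prefix matches k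
  have hpref : ∀ q ∈ (PySem.List.enumerate k.toList).filter (fun q => q.2 == '.'),
      (k == String.ofList (k.toList.take q.1.toNat)
        || PySem.Str.startswith k (String.ofList (k.toList.take q.1.toNat) ++ ".")) = true := by
    intro q hq
    obtain ⟨hqmem, hqdot⟩ := List.mem_filter.mp hq
    obtain ⟨n, hn, hqeq⟩ := (PySem.List.mem_enumerate_iff k.toList 0 q).mp hqmem
    have hq1 : q.1 = (n : Int) := by rw [hqeq]; simp
    have hq2 : q.2 = k.toList[n] := by rw [hqeq]
    have hdot : k.toList[n] = '.' := by rw [← hq2]; simpa using hqdot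
    apply Bool.or_eq_true_iff.mpr
    right
    rw [PySem.Str.startswith_eq]
    rw [PySem.Chars.startswith_iff]
    have htl : (String.ofList (k.toList.take q.1.toNat) ++ ".").toList = k.toList.take n ++ ['.'] := by
      simp [hq1]
    rw [htl]
    have : k.toList.take n ++ ['.'] = k.toList.take (n + 1) := by
      rw [← hdot]
      simpa using List.take_concat_get hn
    rw [this]
    exact List.take_prefix (n + 1) k.toList
  cases hgl : ((PySem.List.enumerate items).filter (fun q => matchesP k q.2)).getLast? with
  | none =>
    have hEnil : ((PySem.List.enumerate items).filter (fun q => matchesP k q.2)) = [] :=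
      List.getLast?_eq_none_iff.mp hgl
    have hwnone : ∀ b, (k == b || PySem.Str.startswith k (b ++ ".")) = true → (wildD items).get? b = none := by
      intro b hb
      cases h : (wildD items).get? b with
      | none => rfl
      | some x =>
        have := hcand b hb x h
        rw [hEnil] at this
        simp at this
    have hexnone : (exactD items).get? k = none := by
      cases h : (exactD items).get? k with
      | none => rfl
      | some x =>
        have := hexcand x h
        rw [hEnil] at this
        simp at this
    rw [hexnone]
    rw [betterFold_none]
    · simp
    · intro o ho
      rcases List.mem_append.mp ho with hdo | hlast
      · obtain ⟨q, hq, hqo⟩ := List.mem_map.mp hdo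
        rw [← hqo]
        exact hwnone _ (hpref q hq)
      · rw [List.mem_singleton.mp hlast]
        exact hwnone k (Bool.or_eq_true_iff.mpr (Or.inl (beq_self_eq_true k)))
  | some qs =>
    have hqsE := List.mem_of_getLast? hgl
    have hqsMatch : matchesP k qs.2 = true := (List.mem_filter.mp hqsE).2
    have hSb : ∀ x ∈ ((PySem.List.enumerate items).filter (fun q => matchesP k q.2)).map (fun q => (q.1, q.2.2)),
        x = (qs.1, qs.2.2) ∨ x.1 < (qs.1, qs.2.2).1 := by
      intro x hx
      obtain ⟨q, hqE, hqx⟩ := List.mem_map.mp hx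
      have hpwE : ((PySem.List.enumerate items).filter (fun q => matchesP k q.2)).Pairwise (fun p q => p.1 < q.1) :=
        List.Pairwise.filter _ (PySem.List.pairwise_lt_enumerate items 0)
      obtain ⟨m', hm', hrel'⟩ := pairwise_getLast _ hpwE q hqE
      rw [hgl] at hm'
      injection hm' with hm'
      subst hm'
      rcases hrel' with heq | hlt
      · left; rw [← hqx, heq]
      · right; rw [← hqx]; exact hlt
    have hfoldm :
        (((((PySem.List.enumerate k.toList).filter (fun q => q.2 == '.')).map
            (fun q => (wildD items).get? (String.ofList (k.toList.take q.1.toNat)))) ++ [(wildD items).get? k]).foldl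
          pvBetter ((exactD items).get? k)) = some (qs.1, qs.2.2) := by
      apply betterFold_max _ _ hSb
      · intro o ho x hox
        rcases List.mem_append.mp ho with hdo | hlast
        · obtain ⟨q, hq, hqo⟩ := List.mem_map.mp hdo
          exact hcand _ (hpref q hq) x (by rw [hqo, hox])
        · rw [List.mem_singleton.mp hlast] at hox
          exact hcand k (Bool.or_eq_true_iff.mpr (Or.inl (beq_self_eq_true k))) x hox
      · exact hexcand
      · -- the last matching item is seen as a candidate
        by_cases hew : PySem.Str.endswith qs.2.1 ".*" = true
        · left
          have hcond : (k == PySem.Str.replace qs.2.1 ".*" ""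
              || PySem.Str.startswith k (PySem.Str.replace qs.2.1 ".*" "" ++ ".")) = true := by
            have := hqsMatch
            unfold matchesP at this
            rwa [if_pos hew] at this
          have himp : ∀ q : Int × String × String, ((PySem.Str.replace q.2.1 ".*" "" == PySem.Str.replace qs.2.1 ".*" "") && PySem.Str.endswith q.2.1 ".*") = true → matchesP k q.2 = true := by
            intro q hq
            simp only [Bool.and_eq_true] at hq
            obtain ⟨hrep, hewq⟩ := hq
            have hrep' : PySem.Str.replace q.2.1 ".*" "" = PySem.Str.replace qs.2.1 ".*" "" := by simpa using hrep
            unfold matchesP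
            rw [if_pos hewq, hrep']
            exact hcond
          have hwqs : (wildD items).get? (PySem.Str.replace qs.2.1 ".*" "") = some (qs.1, qs.2.2) := by
            rw [wildD_get?_eq]
            rw [lastP_hit items k _ himp qs hgl (by rw [Bool.and_eq_true]; exact ⟨beq_self_eq_true _, hew⟩)]
            rfl
          rcases Bool.or_eq_true_iff.mp hcond with hkb | hsw
          · -- k itself is the base: the final candidate
            apply List.mem_append_right
            apply List.mem_singleton.mpr
            have hk : k = PySem.Str.replace qs.2.1 ".*" "" := by simpa using hkb
            rw [hk, hwqs]
          · -- a dotted prefix of k is the base: one of the scanned candidates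
            apply List.mem_append_left
            have hpre : (PySem.Str.replace qs.2.1 ".*" "").toList ++ ['.'] <+: k.toList := by
              have := hsw
              rw [PySem.Str.startswith_eq, PySem.Chars.startswith_iff] at this
              simpa using this
            obtain ⟨t, ht⟩ := hpre
            have ht' : (PySem.Str.replace qs.2.1 ".*" "").toList ++ '.' :: t = k.toList := by
              simpa using ht
            have hn : (PySem.Str.replace qs.2.1 ".*" "").toList.length < k.toList.length := by
              rw [← ht']; simp
            have hdotn : k.toList[(PySem.Str.replace qs.2.1 ".*" "").toList.length]'hn = '.' := by
              simp only [← ht']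
              rw [List.getElem_append_right (Nat.le_refl _)]
              simp
            have htake : k.toList.take (PySem.Str.replace qs.2.1 ".*" "").toList.length
                = (PySem.Str.replace qs.2.1 ".*" "").toList := by
              rw [← ht']
              exact List.take_left
            apply List.mem_map.mpr
            refine ⟨(((PySem.Str.replace qs.2.1 ".*" "").toList.length : Int), '.'), ?_, ?_⟩
            · apply List.mem_filter.mpr
              constructor
              · apply (PySem.List.mem_enumerate_iff k.toList 0 _).mpr
                refine ⟨(PySem.Str.replace qs.2.1 ".*" "").toList.length, hn, ?_⟩
                rw [Prod.mk.injEq]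
                exact ⟨by omega, hdotn.symm⟩
              · simp
            · simp only [Int.toNat_natCast, htake]
              rw [show String.ofList (PySem.Str.replace qs.2.1 ".*" "").toList = PySem.Str.replace qs.2.1 ".*" "" from String.ofList_toList]
              exact hwqs
        · right
          have hew' : PySem.Str.endswith qs.2.1 ".*" = false := by simpa using hew
          have hkq : (k == qs.2.1) = true := by
            have := hqsMatch
            unfold matchesP at this
            rwa [hew', if_neg (by simp)] at this
          have himp : ∀ q : Int × String × String, ((q.2.1 == k) && !(PySem.Str.endswith q.2.1 ".*")) = true → matchesP k q.2 = true := by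
            intro q hq
            simp only [Bool.and_eq_true] at hq
            obtain ⟨hkey, hewq⟩ := hq
            have hewq' : PySem.Str.endswith q.2.1 ".*" = false := by simpa using hewq
            unfold matchesP
            rw [hewq']
            simp only [Bool.false_eq_true, if_false]
            have : q.2.1 = k := by simpa using hkey
            simp [this]
          have hq1 : (qs.2.1 == k) = true := by
            have hk' : k = qs.2.1 := by simpa using hkq
            rw [hk']
            exact beq_self_eq_true _
          rw [exactD_get?_eq]
          rw [lastP_hit items k _ himp qs hgl (by rw [Bool.and_eq_true]; exact ⟨hq1, by rw [hew']; rfl⟩)]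
          rfl
    rw [hfoldm]
    simp

-- pointwise-equal step functions fold alike
theorem foldl_fun_congr {α β : Type} (f g : β → α → β) (h : ∀ d k, f d k = g d k) :
    ∀ (l : List α) (b : β), l.foldl f b = l.foldl g b := by
  intro l
  induction l with
  | nil => intro b; rfl
  | cons x l ih =>
    intro b
    simp only [List.foldl_cons, h b x]
    exact ih (g b x)

-- ===== VERDICT (by name: the statement is the Claim_ definition above) =====
theorem updateSummaryDict_py_spec : Claim_equal_updateSummaryDict_py := by
  intro main_dict adjustments _
  unfold Spec_updateSummaryDict_py updateSummaryDict_py updateSummaryDict_py_alt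
  by_cases hadj : (PySem.Dict.ofList adjustments).items = []
  · simp only [hadj, if_pos]
  · simp only [hadj, if_neg, if_false]
    congr 1
    apply foldl_fun_congr
    intro d k
    rw [foldA_eq]
    exact (key_step_eq (PySem.Dict.ofList adjustments).items k d).symm
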